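-- pv_equiv track=rewrite | github.com/SimakovIlya/QuSim | qusim/Pauli_basis/from_rho_vec_to_rho_square.py | tensor_string_arrays
-- ===== SOURCE A (Python) =====
-- def tensor_string_arrays(s1, s2):
--     n1 = len(s1[0])
--     m1 = len(s1)
--     n2 = len(s2[0])
--     m2 = len(s2)
--     m = m1*m2
--     n = n1*n2
--     result = [[0] * n for i in range(m)]
--     for i in range(0, m):
--         for j in range(0, n):
--             result[i][j] = s1[i//m2][j//n2] + s2[i%m2][j%n2]
--     return result
-- ===== SOURCE B (Python) =====
-- def tensor_string_arrays(s1, s2):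
--     n1 = len(s1[0])
--     n2 = len(s2[0])
--     result = []
--     for row1 in s1:
--         for row2 in s2:
--             row = []
--             for j1 in range(n1):
--                 for j2 in range(n2):
--                     row.append(row1[j1] + row2[j2])
--             result.append(row)
--     return result
-- ===== Notes on version B (the rewrite author's own statement) =====
-- stated objective: simpler
-- what changed: Replaces A's flat loops over pre-allocated m1*m2 x n1*n2 cells with index recovery by //m2, %m2, //n2, %n2 by direct nested iteration over the rows of s1 and s2 and the column ranges, appending each row in block order.
import Mathlib
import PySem

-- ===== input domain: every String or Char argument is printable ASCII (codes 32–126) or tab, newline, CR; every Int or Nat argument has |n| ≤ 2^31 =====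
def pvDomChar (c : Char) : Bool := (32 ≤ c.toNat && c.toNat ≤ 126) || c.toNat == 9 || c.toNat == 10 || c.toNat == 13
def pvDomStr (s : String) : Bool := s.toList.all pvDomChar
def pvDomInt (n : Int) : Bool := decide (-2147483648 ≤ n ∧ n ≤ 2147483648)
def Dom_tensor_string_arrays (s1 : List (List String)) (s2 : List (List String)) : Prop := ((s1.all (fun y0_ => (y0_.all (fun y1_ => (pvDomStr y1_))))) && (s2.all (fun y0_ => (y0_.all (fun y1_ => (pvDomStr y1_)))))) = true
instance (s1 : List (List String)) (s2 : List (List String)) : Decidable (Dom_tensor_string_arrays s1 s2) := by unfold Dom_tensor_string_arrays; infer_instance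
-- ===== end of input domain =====

-- B replaces A's flat index loops with //,% recovery by direct nested iteration over the
-- operand rows and column ranges (simpler decomposition, same asymptotic cost).


-- ===== PORT A =====
-- Literal port of A: flat loops over m = m1*m2 rows and n = n1*n2 columns, recovering the
-- operand indices by division and modulo. All indices are nonnegative and in range under
-- Pre_, so Python's s[i] is List.getD; len(s1[0]) (raising on []) is totalized by headD.
def tensor_string_arrays (s1 : List (List String)) (s2 : List (List String)) : List (List String) :=
  let n1 := (s1.headD []).length
  let m1 := s1.length
  let n2 := (s2.headD []).length
  let m2 := s2.length
  (List.range (m1 * m2)).map (fun i =>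
    (List.range (n1 * n2)).map (fun j =>
      (s1.getD (i / m2) []).getD (j / n2) "" ++ (s2.getD (i % m2) []).getD (j % n2) ""))

-- ===== PORT B =====
-- Port of B: iterate the rows of s1 and s2 directly, building each output row by the two
-- inner column loops (append-in-loop becomes flatMap/map).
def tensor_string_arrays_alt (s1 : List (List String)) (s2 : List (List String)) : List (List String) :=
  let n1 := (s1.headD []).length
  let n2 := (s2.headD []).length
  s1.flatMap (fun row1 =>
    s2.map (fun row2 =>
      (List.range n1).flatMap (fun j1 =>
        (List.range n2).map (fun j2 => row1.getD j1 "" ++ row2.getD j2 ""))))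

-- ===== PRECONDITION & SPEC =====
-- Pre_ excludes exactly the inputs where Python A raises IndexError: an empty s1 or s2
-- (len(s1[0]) / len(s2[0])), or — when any column access happens at all (n1*n2 > 0) —
-- a row of s1 shorter than n1 or a row of s2 shorter than n2.
def Pre_tensor_string_arrays (s1 : List (List String)) (s2 : List (List String)) : Prop :=
  s1 ≠ [] ∧ s2 ≠ [] ∧
  ((s1.headD []).length * (s2.headD []).length > 0 →
    (∀ r ∈ s1, (s1.headD []).length ≤ r.length) ∧
    (∀ r ∈ s2, (s2.headD []).length ≤ r.length))
instance (s1 : List (List String)) (s2 : List (List String)) : Decidable (Pre_tensor_string_arrays s1 s2) := by unfold Pre_tensor_string_arrays; infer_instance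
def pvWitness_tensor_string_arrays : List (List String) × List (List String) :=
  ([["a", "b"], ["c", "d"]], [["x"], ["y"]])
def Spec_tensor_string_arrays (s1 : List (List String)) (s2 : List (List String)) (out : List (List String)) : Prop := out = tensor_string_arrays_alt s1 s2
instance (s1 : List (List String)) (s2 : List (List String)) (out : List (List String)) : Decidable (Spec_tensor_string_arrays s1 s2 out) := by unfold Spec_tensor_string_arrays; infer_instance

-- ===== CLAIM (what is proved, stated in full; the proofs are below) =====
def Claim_equal_tensor_string_arrays : Prop := ∀ (s1 : List (List String)) (s2 : List (List String)), Dom_tensor_string_arrays s1 s2 → Pre_tensor_string_arrays s1 s2 → Spec_tensor_string_arrays s1 s2 (tensor_string_arrays s1 s2)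

-- ===== LEMMAS AND PROOFS =====

-- Splitting a map over range (a*b) into the block structure (q, r) ↦ q*b + r.
theorem pv_range_mul_map {α : Type} (a b : Nat) (g : Nat → α) :
    (List.range (a * b)).map g =
      (List.range a).flatMap (fun q => (List.range b).map (fun r => g (q * b + r))) := by
  induction a with
  | zero => simp
  | succ a ih =>
    rw [Nat.succ_mul, List.range_add, List.map_append, ih, List.range_succ,
        List.flatMap_append]
    simp [List.map_map, Function.comp]

-- Indexing a list by getD over range (its length) is the list itself.
theorem pv_map_getD_range {α : Type} (l : List α) (d : α) :
    (List.range l.length).map (fun q => l.getD q d) = l := by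
  apply List.ext_getElem
  · simp
  · intro i h1 h2
    simp [List.getElem?_eq_getElem h2]

-- A flatMap over range-of-length via getD is a flatMap over the list.
theorem pv_flatMap_getD_range {α β : Type} (l : List α) (d : α) (G : α → List β) :
    (List.range l.length).flatMap (fun q => G (l.getD q d)) = l.flatMap G := by
  conv_rhs => rw [← pv_map_getD_range l d]
  rw [List.flatMap_map]

-- A map over range-of-length via getD is a map over the list.
theorem pv_map_getD_range_map {α β : Type} (l : List α) (d : α) (G : α → β) :
    (List.range l.length).map (fun q => G (l.getD q d)) = l.map G := by
  conv_rhs => rw [← pv_map_getD_range l d]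
  rw [List.map_map]
  rfl

-- Block-index recovery: (q*b + r) / b = q and (q*b + r) % b = r for r < b.
theorem pv_block_div (q b r : Nat) (h : r < b) : (q * b + r) / b = q := by
  rw [Nat.mul_comm, Nat.mul_add_div (Nat.zero_lt_of_lt h),
      Nat.div_eq_of_lt h, Nat.add_zero]
theorem pv_block_mod (q b r : Nat) (h : r < b) : (q * b + r) % b = r := by
  rw [Nat.mul_comm, Nat.mul_add_mod, Nat.mod_eq_of_lt h]

-- ===== VERDICT (by name: the statement is the Claim_ definition above) =====
theorem tensor_string_arrays_spec : Claim_equal_tensor_string_arrays := by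
  intro s1 s2 _ _
  unfold Spec_tensor_string_arrays tensor_string_arrays tensor_string_arrays_alt
  simp only
  rw [pv_range_mul_map]
  apply Eq.trans _ (pv_flatMap_getD_range s1 [] _)
  apply List.flatMap_congr
  intro q hq
  apply Eq.trans _ (pv_map_getD_range_map s2 [] _)
  apply List.map_congr_left
  intro r hr
  rw [List.mem_range] at hr
  rw [pv_block_div q s2.length r hr, pv_block_mod q s2.length r hr,
      pv_range_mul_map]
  apply List.flatMap_congr
  intro j1 _
  apply List.map_congr_left
  intro j2 hj2
  rw [List.mem_range] at hj2
  rw [pv_block_div j1 _ j2 hj2, pv_block_mod j1 _ j2 hj2]
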